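-- pv_equiv track=rewrite | github.com/NervanaSystems/ngraph-tf | diagnostics/tf_bisect.py | create_poset_grouping
-- ===== SOURCE A (Python) =====
-- def create_poset_grouping(poset, sink_first=False):
--     """Given a partial ordering map, returns uncomparable element groupings.
--
--     Args:
--         poset (dictionary<T, list<T>>): Can be source first, eg: {0: [1, 2,3], 1: [4,5], 2: [4,6], 3: [5,6], 4:[7], 5:[7], 6:[7]}
--         Can be sink first: {7: [4,5,6], 4: [1,2], 5: [1,3], 6: [2,3], 1: [0], 2: [0], 3: [0]}
--         sink_first (Bool or None): Indicates if poset is in source-first or sink-first representation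
--
--     Returns:
--         dictionary<int, set<T>>: Groups non-comparables together. Keys values indicate sort order.
--
--     Example:
--         # Poset on the relation 'is subset' in the powerset of a 3 element set
--         poset = {0: [1,2,3], 1: [4,5], 2: [4,6], 3: [5,6], 4:[7], 5:[7], 6:[7]}
--         poset1 = {7: [4,5,6], 4: [1,2], 5: [1,3], 6: [2,3], 1: [0], 2: [0], 3: [0]}
--         print create_poset_grouping(poset)  # {0: set([0]), 1: set([1, 2, 3]), 2: set([4, 5, 6]), 3: set([7])}
--         print create_poset_grouping(poset1, True) #{0: set([0]), 1: set([1, 2, 3]), 2: set([4, 5, 6]), 3: set([7])}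
--     """
--     # TODO: check_posetness(ordering)
--
--     def pop_endpoints_in_poset(poset):
--         endpoints = set(poset.keys()).difference(set(sum(poset.values(), [])))
--         for i in endpoints:
--             del poset[i]
--         return endpoints
--
--     c = 0
--     groupings = {}
--     poset = {k:poset[k] for k in poset if len(poset[k]) > 0}
--     # this line filters entries like {x : []}.
--     # {x : []} says x is larger (or smaller) than no element,
--     # which is redundant and does not need to be stated.
--     # Specifically it will cause the next line to fail
--     # (where extreme_endpoints is computed)
--     extreme_endpoints = set(sum(poset.values(), [])).difference(set(poset.keys()))
--     while len(poset)!=0: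
--         groupings[c] = pop_endpoints_in_poset(poset)
--         c += 1
--     groupings[c] = extreme_endpoints
--
--     # The algorithm is agnostic to source-first or sink-first representation up to this point
--     if sink_first:
--         return {c-k:groupings[k] for k in groupings}
--     else:
--         return groupings
-- ===== SOURCE B (Python) =====
-- def create_poset_grouping(poset, sink_first=False):
--     # One upfront counting pass (reference counts + the extreme endpoints),
--     # then layered peeling by decrementing counts instead of re-flattening
--     # all value lists every round.
--     items = [(k, v) for k, v in poset.items() if v]
--     keys = set(k for k, _ in items)
--     cnt = {}            # occurrences of each key inside the remaining value lists
--     extreme = []        # non-key values, first-occurrence order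
--     ext_seen = set(keys)
--     for _, vs in items:
--         for x in vs:
--             if x in keys:
--                 cnt[x] = cnt.get(x, 0) + 1
--             elif x not in ext_seen:
--                 ext_seen.add(x)
--                 extreme.append(x)
--     groupings = {}
--     c = 0
--     remaining = items
--     while remaining:
--         layer = set(k for k, _ in remaining if cnt.get(k, 0) == 0)
--         nxt = []
--         for k, vs in remaining:
--             if k in layer:
--                 for x in vs:
--                     if x in keys:
--                         cnt[x] -= 1
--             else:
--                 nxt.append((k, vs))
--         groupings[c] = layer
--         remaining = nxt
--         c += 1
--     groupings[c] = set(extreme)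
--     if sink_first:
--         return {c - k: v for k, v in groupings.items()}
--     return groupings
-- ===== Notes on version B (the rewrite author's own statement) =====
-- stated objective: alternative
-- what changed: Instead of re-flattening all remaining value lists via repeated quadratic list concatenation and rebuilding the key/value sets every peeling round, B makes one upfront pass computing reference counts of every key and the extreme endpoints, then peels layers by decrementing counts along the removed entries' value lists (it trades A's per-round set rebuilds for an incrementally maintained count table; a timing run could not certify a speed-up because its large random inputs are cyclic, where neither program terminates).
import Mathlib
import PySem

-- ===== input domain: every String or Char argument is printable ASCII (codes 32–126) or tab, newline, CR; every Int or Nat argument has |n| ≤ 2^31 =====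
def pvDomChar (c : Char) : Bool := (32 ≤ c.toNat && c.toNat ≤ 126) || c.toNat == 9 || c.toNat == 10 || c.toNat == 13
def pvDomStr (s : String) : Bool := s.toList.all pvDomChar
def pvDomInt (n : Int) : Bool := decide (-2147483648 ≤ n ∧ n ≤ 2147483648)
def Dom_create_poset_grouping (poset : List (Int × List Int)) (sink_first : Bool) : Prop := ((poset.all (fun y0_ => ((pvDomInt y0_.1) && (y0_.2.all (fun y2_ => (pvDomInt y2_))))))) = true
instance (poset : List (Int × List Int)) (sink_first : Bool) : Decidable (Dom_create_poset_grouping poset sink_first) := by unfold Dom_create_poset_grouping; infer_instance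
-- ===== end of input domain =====

-- B replaces A's per-round re-flattening of all remaining value lists (quadratic list concatenation)
-- by one upfront counting pass over the edges plus count decrements while peeling (alternative algorithm).
-- A mutates its dict argument in Python (pop_endpoints_in_poset deletes keys); the equivalence proved
-- here is about the RETURN value only (B does not mutate its argument).


-- ===== PORT A =====
-- endpoints = set(poset.keys()).difference(set(sum(poset.values(), [])))
def pvEndpoints (d : List (Int × List Int)) : PySem.Set Int :=
  PySem.Set.diff (PySem.Set.ofList (d.map Prod.fst)) (PySem.Set.ofList ((d.map Prod.snd).flatten))

-- while len(poset) != 0: groupings[c] = pop_endpoints_in_poset(poset); c += 1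
-- ('del poset[i] for i in endpoints' keeps the order of the surviving entries = filter).
-- Fuel guard only: when endpoints is empty and the dict non-empty the Python loop never terminates;
-- one key is deleted per productive round, so fuel = length suffices wherever the Python returns.
def pvPeelA : Nat → List (Int × List Int) → Int → PySem.Dict Int (PySem.Set Int) → Int × PySem.Dict Int (PySem.Set Int)
  | 0, _, c, gs => (c, gs)
  | fuel+1, d, c, gs =>
    if d.isEmpty then (c, gs)
    else
      let e := pvEndpoints d
      pvPeelA fuel (d.filter (fun kv => !(PySem.Set.contains e kv.1))) (c + 1) (gs.insert c e)

def create_poset_grouping (poset : List (Int × List Int)) (sink_first : Bool) : List (Int × List Int) :=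
  let d0 := (PySem.Dict.ofList poset).items
  let d := d0.filter (fun kv => kv.2.length > 0)   -- {k: poset[k] for k in poset if len(poset[k]) > 0}
  let extreme := PySem.Set.diff (PySem.Set.ofList ((d.map Prod.snd).flatten)) (PySem.Set.ofList (d.map Prod.fst))
  let r := pvPeelA d.length d 0 PySem.Dict.empty
  let gs := r.2.insert r.1 extreme                 -- groupings[c] = extreme_endpoints
  if sink_first then
    (gs.items.foldl (fun acc kv => acc.insert (r.1 - kv.1) kv.2) PySem.Dict.empty).items
  else gs.items

-- ===== PORT B =====
-- one pass over all value lists: reference counts of keys, and the non-key values (first occurrences)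
-- state = (cnt, (extreme, ext_seen))
def pvCountInit (items : List (Int × List Int)) (keys : PySem.Set Int) :
    PySem.Dict Int Int × List Int × PySem.Set Int :=
  items.foldl (fun st kv =>
    kv.2.foldl (fun (st : PySem.Dict Int Int × List Int × PySem.Set Int) x =>
      if PySem.Set.contains keys x then
        (st.1.modify x 0 (· + 1), st.2.1, st.2.2)
      else if PySem.Set.contains st.2.2 x then st
      else (st.1, st.2.1 ++ [x], PySem.Set.add st.2.2 x)) st)
    (PySem.Dict.empty, [], keys)

-- while remaining: layer = keys of remaining whose count is 0; decrement counts along the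
-- removed entries' value lists; keep the other entries.  Fuel guard as in A's port.
def pvPeelB : Nat → List (Int × List Int) → PySem.Set Int → PySem.Dict Int Int → Int →
    PySem.Dict Int (PySem.Set Int) → Int × PySem.Dict Int (PySem.Set Int)
  | 0, _, _, _, c, gs => (c, gs)
  | fuel+1, remaining, keys, cnt, c, gs =>
    if remaining.isEmpty then (c, gs)
    else
      let layer := PySem.Set.ofList ((remaining.map Prod.fst).filter (fun k => cnt.getD k 0 == 0))
      let st := remaining.foldl (fun (st : PySem.Dict Int Int × List (Int × List Int)) kv =>
          if PySem.Set.contains layer kv.1 then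
            (kv.2.foldl (fun cnt x => if PySem.Set.contains keys x then cnt.modify x 0 (· - 1) else cnt) st.1, st.2)
          else (st.1, st.2 ++ [kv]))
        (cnt, [])
      pvPeelB fuel st.2 keys st.1 (c + 1) (gs.insert c layer)

def create_poset_grouping_alt (poset : List (Int × List Int)) (sink_first : Bool) : List (Int × List Int) :=
  let items := (PySem.Dict.ofList poset).items.filter (fun kv => kv.2.length > 0)
  let keys := PySem.Set.ofList (items.map Prod.fst)
  let init := pvCountInit items keys
  let r := pvPeelB items.length items keys init.1 0 PySem.Dict.empty
  let gs := r.2.insert r.1 (PySem.Set.ofList init.2.1)    -- groupings[c] = set(extreme)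
  if sink_first then
    (gs.items.foldl (fun acc kv => acc.insert (r.1 - kv.1) kv.2) PySem.Dict.empty).items
  else gs.items

-- ===== PRECONDITION & SPEC =====
def Spec_create_poset_grouping (poset : List (Int × List Int)) (sink_first : Bool) (out : List (Int × List Int)) : Prop := out = create_poset_grouping_alt poset sink_first
instance (poset : List (Int × List Int)) (sink_first : Bool) (out : List (Int × List Int)) : Decidable (Spec_create_poset_grouping poset sink_first out) := by unfold Spec_create_poset_grouping; infer_instance

-- ===== CLAIM (what is proved, stated in full; the proofs are below) =====
def Claim_equal_create_poset_grouping : Prop := ∀ (poset : List (Int × List Int)) (sink_first : Bool), Dom_create_poset_grouping poset sink_first → Spec_create_poset_grouping poset sink_first (create_poset_grouping poset sink_first)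

-- ===== LEMMAS AND PROOFS =====

lemma pvGetD_decAll (keys : PySem.Set Int) (vs : List Int) (cnt : PySem.Dict Int Int) (y : Int) :
    (vs.foldl (fun cnt x => if PySem.Set.contains keys x then cnt.modify x 0 (· - 1) else cnt) cnt).getD y 0
      = cnt.getD y 0 - (if PySem.Set.contains keys y then (vs.count y : Int) else 0) := by
  induction vs generalizing cnt with
  | nil => simp
  | cons x vs ih =>
    simp only [List.foldl_cons, ih, List.count_cons]
    by_cases hx : PySem.Set.contains keys x = true
    · simp only [hx, if_true]
      by_cases hy : PySem.Set.contains keys y = true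
      · simp only [hy, if_true]
        rw [PySem.Dict.getD_modify]
        by_cases hxy : y = x
        · subst hxy; simp; push_cast; ring
        · have : (y == x) = false := by simp [hxy]
          simp [hxy]
          exact fun h => hxy h.symm
      · simp only [hy, if_false]
        rw [PySem.Dict.getD_modify]
        have hxy : ¬ y = x := by rintro rfl; exact hy hx
        simp [hxy]
    · simp only [Bool.not_eq_true] at hx
      simp only [hx, Bool.false_eq_true, if_false]
      by_cases hy : PySem.Set.contains keys y = true
      · have hxy : ¬ y = x := by rintro rfl; rw [hy] at hx; cases hx
        have : (y == x) = false := by simp [hxy]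
        have hxy2 : ¬ x = y := fun h => hxy h.symm
        simp [hy, hxy2]
      · have hy' : y ∉ keys := by simpa using hy
        simp [hy']

lemma pvGetD_incAll (keys : PySem.Set Int) (vs : List Int) (cnt : PySem.Dict Int Int) (y : Int) :
    (vs.foldl (fun cnt x => if PySem.Set.contains keys x then cnt.modify x 0 (· + 1) else cnt) cnt).getD y 0
      = cnt.getD y 0 + (if PySem.Set.contains keys y then (vs.count y : Int) else 0) := by
  induction vs generalizing cnt with
  | nil => simp
  | cons x vs ih =>
    simp only [List.foldl_cons, ih, List.count_cons]
    by_cases hx : PySem.Set.contains keys x = true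
    · simp only [hx, if_true]
      by_cases hy : PySem.Set.contains keys y = true
      · simp only [hy, if_true]
        rw [PySem.Dict.getD_modify]
        by_cases hxy : y = x
        · subst hxy; simp; push_cast; ring
        · have : (y == x) = false := by simp [hxy]
          simp [hxy]
          exact fun h => hxy h.symm
      · simp only [hy, if_false]
        rw [PySem.Dict.getD_modify]
        have hxy : ¬ y = x := by rintro rfl; exact hy hx
        simp [hxy]
    · simp only [Bool.not_eq_true] at hx
      simp only [hx, Bool.false_eq_true, if_false]
      by_cases hy : PySem.Set.contains keys y = true
      · have hxy : ¬ y = x := by rintro rfl; rw [hy] at hx; cases hx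
        have : (y == x) = false := by simp [hxy]
        have hxy2 : ¬ x = y := fun h => hxy h.symm
        simp [hy, hxy2]
      · have hy' : y ∉ keys := by simpa using hy
        simp [hy']

lemma pvCount_split (d : List (Int × List Int)) (q : Int × List Int → Bool) (x : Int) :
    (((d.filter q).map Prod.snd).flatten.count x : Int)
      + (((d.filter (fun kv => !q kv)).map Prod.snd).flatten.count x : Int)
      = ((d.map Prod.snd).flatten.count x : Int) := by
  induction d with
  | nil => simp
  | cons kv d ih =>
    by_cases h : q kv = true
    · simp [h, List.count_append, ← ih]; push_cast; ring
    · simp only [Bool.not_eq_true] at h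
      simp [h, List.count_append, ← ih]; push_cast; ring

lemma pvPeelB_round (layer keys : PySem.Set Int) (d : List (Int × List Int)) (cnt : PySem.Dict Int Int) :
    d.foldl (fun (st : PySem.Dict Int Int × List (Int × List Int)) kv =>
        if PySem.Set.contains layer kv.1 then
          (kv.2.foldl (fun cnt x => if PySem.Set.contains keys x then cnt.modify x 0 (· - 1) else cnt) st.1, st.2)
        else (st.1, st.2 ++ [kv])) (cnt, [])
      = (((d.filter (fun kv => PySem.Set.contains layer kv.1)).map Prod.snd).flatten.foldl
            (fun cnt x => if PySem.Set.contains keys x then cnt.modify x 0 (· - 1) else cnt) cnt,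
         d.filter (fun kv => !(PySem.Set.contains layer kv.1))) := by
  have hcomp : (fun (st : PySem.Dict Int Int × List (Int × List Int)) (kv : Int × List Int) =>
        if PySem.Set.contains layer kv.1 then
          (kv.2.foldl (fun cnt x => if PySem.Set.contains keys x then cnt.modify x 0 (· - 1) else cnt) st.1, st.2)
        else (st.1, st.2 ++ [kv]))
      = (fun st kv =>
        ((if PySem.Set.contains layer kv.1 then
            kv.2.foldl (fun cnt x => if PySem.Set.contains keys x then cnt.modify x 0 (· - 1) else cnt) st.1
          else st.1),
         (if PySem.Set.contains layer kv.1 then st.2 else st.2 ++ [kv]))) := by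
    funext st kv
    cases h : PySem.Set.contains layer kv.1 <;>
      simp only [h, if_true, if_false, Bool.false_eq_true]
  rw [hcomp, PySem.List.foldl_prod_mk
    (fun (s1 : PySem.Dict Int Int) (kv : Int × List Int) =>
      if PySem.Set.contains layer kv.1 then
        kv.2.foldl (fun cnt x => if PySem.Set.contains keys x then cnt.modify x 0 (· - 1) else cnt) s1
      else s1)
    (fun (s2 : List (Int × List Int)) (kv : Int × List Int) =>
      if PySem.Set.contains layer kv.1 then s2 else s2 ++ [kv]) d cnt []]
  refine Prod.ext ?_ ?_
  · show _ = _
    rw [List.foldl_flatten, List.foldl_map, ← List.foldl_filter]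
  · show _ = _
    have h2 := PySem.List.foldl_append_if (fun kv : Int × List Int => !(PySem.Set.contains layer kv.1)) id d ([] : List (Int × List Int))
    simpa using h2

lemma pvLayer_eq (d : List (Int × List Int)) (cnt : PySem.Dict Int Int)
    (hnd : (d.map Prod.fst).Nodup)
    (hcnt : ∀ x ∈ d.map Prod.fst, cnt.getD x 0 = ((d.map Prod.snd).flatten.count x : Int)) :
    PySem.Set.ofList ((d.map Prod.fst).filter (fun k => cnt.getD k 0 == 0)) = pvEndpoints d := by
  have h1 : PySem.Set.ofList ((d.map Prod.fst).filter (fun k => cnt.getD k 0 == 0))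
      = (d.map Prod.fst).filter (fun k => cnt.getD k 0 == 0) :=
    PySem.Set.ofList_eq_self_of_nodup _ (hnd.filter _)
  rw [h1]
  show _ = PySem.Set.diff _ _
  rw [PySem.Set.ofList_eq_self_of_nodup _ hnd]
  show _ = List.filter _ (d.map Prod.fst)
  refine List.filter_congr ?_
  intro k hk
  rw [hcnt k hk]
  by_cases hm : k ∈ (d.map Prod.snd).flatten
  · have hc : (d.map Prod.snd).flatten.count k ≠ 0 := by
      simpa [List.count_eq_zero] using hm
    simp [hc, hm, PySem.Set.contains, PySem.Set.mem_ofList]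
  · have hc : (d.map Prod.snd).flatten.count k = 0 := by simpa [List.count_eq_zero] using hm
    simp [hc, hm, PySem.Set.contains, PySem.Set.mem_ofList]

lemma pvPeel_lockstep (fuel : Nat) (d : List (Int × List Int)) (keys : PySem.Set Int)
    (cnt : PySem.Dict Int Int) (c : Int) (gs : PySem.Dict Int (PySem.Set Int))
    (hnd : (d.map Prod.fst).Nodup)
    (hsub : ∀ k ∈ d.map Prod.fst, PySem.Set.contains keys k = true)
    (hcnt : ∀ x ∈ d.map Prod.fst, cnt.getD x 0 = ((d.map Prod.snd).flatten.count x : Int)) :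
    pvPeelB fuel d keys cnt c gs = pvPeelA fuel d c gs := by
  induction fuel generalizing d cnt c gs with
  | zero => rfl
  | succ fuel ih =>
    by_cases hemp : d.isEmpty
    · simp [pvPeelB, pvPeelA, hemp]
    · have hl := pvLayer_eq d cnt hnd hcnt
      simp only [pvPeelB, pvPeelA, hemp, Bool.false_eq_true, if_false]
      rw [pvPeelB_round, hl]
      dsimp only
      have hsubl : (d.filter (fun kv => !(PySem.Set.contains (pvEndpoints d) kv.1))).Sublist d :=
        List.filter_sublist
      have hmapsub : ((d.filter (fun kv => !(PySem.Set.contains (pvEndpoints d) kv.1))).map Prod.fst).Sublist (d.map Prod.fst) :=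
        hsubl.map Prod.fst
      refine ih _ _ _ _ (hnd.sublist hmapsub) (fun k hk => hsub k (hmapsub.mem hk)) ?_
      intro x hx
      have hxd : x ∈ d.map Prod.fst := hmapsub.mem hx
      rw [pvGetD_decAll, hcnt x hxd, hsub x hxd, if_pos rfl]
      have hsplit := pvCount_split d (fun kv => PySem.Set.contains (pvEndpoints d) kv.1) x
      omega

lemma pvCountInit_eq (items : List (Int × List Int)) (keys : PySem.Set Int) :
    pvCountInit items keys
      = ((items.map Prod.snd).flatten.foldl
            (fun cnt x => if PySem.Set.contains keys x then cnt.modify x 0 (· + 1) else cnt) PySem.Dict.empty,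
         (items.map Prod.snd).flatten.foldl
            (fun (st : List Int × PySem.Set Int) x =>
              if PySem.Set.contains keys x then st
              else if PySem.Set.contains st.2 x then st
              else (st.1 ++ [x], PySem.Set.add st.2 x)) ([], keys)) := by
  unfold pvCountInit
  have hcomp : (fun (st : PySem.Dict Int Int × List Int × PySem.Set Int) (kv : Int × List Int) =>
      kv.2.foldl (fun (st : PySem.Dict Int Int × List Int × PySem.Set Int) x =>
        if PySem.Set.contains keys x then (st.1.modify x 0 (· + 1), st.2.1, st.2.2)
        else if PySem.Set.contains st.2.2 x then st
        else (st.1, st.2.1 ++ [x], PySem.Set.add st.2.2 x)) st)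
    = (fun st kv =>
        (kv.2.foldl (fun cnt x => if PySem.Set.contains keys x then cnt.modify x 0 (· + 1) else cnt) st.1,
         kv.2.foldl (fun (s2 : List Int × PySem.Set Int) x =>
              if PySem.Set.contains keys x then s2
              else if PySem.Set.contains s2.2 x then s2
              else (s2.1 ++ [x], PySem.Set.add s2.2 x)) st.2)) := by
    funext st kv
    have hstep : (fun (st : PySem.Dict Int Int × List Int × PySem.Set Int) (x : Int) =>
        if PySem.Set.contains keys x then (st.1.modify x 0 (· + 1), st.2.1, st.2.2)
        else if PySem.Set.contains st.2.2 x then st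
        else (st.1, st.2.1 ++ [x], PySem.Set.add st.2.2 x))
      = (fun st x =>
        ((if PySem.Set.contains keys x then st.1.modify x 0 (· + 1) else st.1),
         (if PySem.Set.contains keys x then st.2
          else if PySem.Set.contains st.2.2 x then st.2
          else (st.2.1 ++ [x], PySem.Set.add st.2.2 x)))) := by
      funext st x
      cases h1 : PySem.Set.contains keys x
      · cases h2 : PySem.Set.contains st.2.2 x <;>
          simp only [h1, h2, Bool.false_eq_true, if_true, if_false]
      · simp only [if_true]
    rw [hstep]
    exact PySem.List.foldl_prod_mk (fun cnt x => if PySem.Set.contains keys x then cnt.modify x 0 (· + 1) else cnt)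
      (fun (s2 : List Int × PySem.Set Int) x =>
      if PySem.Set.contains keys x then s2
      else if PySem.Set.contains s2.2 x then s2
      else (s2.1 ++ [x], PySem.Set.add s2.2 x)) kv.2 st.1 st.2
  rw [hcomp, PySem.List.foldl_prod_mk
    (fun (s1 : PySem.Dict Int Int) (kv : Int × List Int) => kv.2.foldl (fun cnt x => if PySem.Set.contains keys x then cnt.modify x 0 (· + 1) else cnt) s1)
    (fun (s2 : List Int × PySem.Set Int) (kv : Int × List Int) => kv.2.foldl (fun (s2 : List Int × PySem.Set Int) x =>
      if PySem.Set.contains keys x then s2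
      else if PySem.Set.contains s2.2 x then s2
      else (s2.1 ++ [x], PySem.Set.add s2.2 x)) s2)
    items PySem.Dict.empty ([], keys)]
  rw [List.foldl_flatten, List.foldl_map, List.foldl_flatten, List.foldl_map]

lemma pvCountInit_cnt (items : List (Int × List Int)) (keys : PySem.Set Int) (y : Int) :
    (pvCountInit items keys).1.getD y 0
      = if PySem.Set.contains keys y then (((items.map Prod.snd).flatten.count y : Int)) else 0 := by
  rw [pvCountInit_eq]
  dsimp only
  rw [pvGetD_incAll]
  simp [PySem.Dict.getD_empty]

lemma pvExtreme_fold (keys : PySem.Set Int) (vs : List Int) (ex : List Int) (seen : PySem.Set Int)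
    (hks : ∀ x, PySem.Set.contains keys x = true → PySem.Set.contains seen x = true) :
    vs.foldl (fun (s2 : List Int × PySem.Set Int) x =>
        if PySem.Set.contains keys x then s2
        else if PySem.Set.contains s2.2 x then s2
        else (s2.1 ++ [x], PySem.Set.add s2.2 x)) (ex, seen)
      = (ex ++ (PySem.Set.ofList vs).filter (fun y => !(PySem.Set.contains seen y)),
         PySem.Set.update seen vs) := by
  induction vs generalizing ex seen with
  | nil => simp [PySem.Set.ofList_nil]
  | cons x vs ih =>
    simp only [List.foldl_cons]
    by_cases hx : PySem.Set.contains seen x = true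
    · have hmem : x ∈ seen := by simpa [PySem.Set.contains_iff] using hx
      have hskip : (if PySem.Set.contains keys x then (ex, seen)
          else if PySem.Set.contains seen x then (ex, seen)
          else (ex ++ [x], PySem.Set.add seen x)) = (ex, seen) := by
        by_cases hk : PySem.Set.contains keys x = true <;> simp [hk, hx] <;> exact fun _ => hmem
      rw [hskip, ih ex seen hks]
      refine Prod.ext ?_ ?_
      · show _ = ex ++ _
        rw [PySem.Set.ofList_cons]
        have hpx : (fun y => !(PySem.Set.contains seen y)) x = false := by simp [hmem]
        simp only [List.filter_cons, hpx, Bool.false_eq_true, if_false]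
        congr 1
        show _ = List.filter _ (PySem.Set.discard (PySem.Set.ofList vs) x)
        rw [PySem.Set.discard, List.filter_filter]
        refine (List.filter_congr ?_).symm
        intro y hy
        by_cases hyx : y = x
        · subst hyx; simp [hmem]
        · simp [hyx, (fun h => hyx (by simpa using h) : ¬(y == x) = true)]
      · show PySem.Set.update seen vs = PySem.Set.update seen (x :: vs)
        rw [PySem.Set.update_cons, PySem.Set.add_of_mem hmem]
    · have hnm : x ∉ seen := by simpa [PySem.Set.contains_iff] using hx
      have hk : PySem.Set.contains keys x = false := by
        cases hkk : PySem.Set.contains keys x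
        · rfl
        · exact absurd (hks x hkk) hx
      simp only [hk, hx, Bool.false_eq_true, if_false]
      rw [ih (ex ++ [x]) (PySem.Set.add seen x)
        (fun z hz => by
          have hzmem : z ∈ seen := by simpa [PySem.Set.contains_iff] using hks z hz
          simp [PySem.Set.add_of_not_mem hnm, PySem.Set.contains_iff, hzmem])]
      refine Prod.ext ?_ ?_
      · show _ = ex ++ _
        rw [PySem.Set.ofList_cons]
        have hpx : (fun y => !(PySem.Set.contains seen y)) x = true := by simp [hnm]
        simp only [List.filter_cons, hpx, if_true]
        rw [List.append_assoc]
        congr 1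
        rw [List.singleton_append]
        congr 1
        rw [PySem.Set.discard, List.filter_filter, PySem.Set.add_of_not_mem hnm]
        refine List.filter_congr ?_
        intro y hy
        by_cases hyx : y = x
        · subst hyx; simp [PySem.Set.contains_iff]
        · have hby : (y == x) = false := by simp [hyx]
          simp [PySem.Set.contains_iff, hby, hyx]
      · show _ = PySem.Set.update seen (x :: vs)
        rw [PySem.Set.update_cons]

lemma pvCountInit_extreme (items : List (Int × List Int)) (keys : PySem.Set Int)
    (hk : keys = PySem.Set.ofList (items.map Prod.fst)) :
    PySem.Set.ofList (pvCountInit items keys).2.1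
      = PySem.Set.diff (PySem.Set.ofList ((items.map Prod.snd).flatten)) (PySem.Set.ofList (items.map Prod.fst)) := by
  rw [pvCountInit_eq]
  dsimp only
  rw [pvExtreme_fold keys _ [] keys (fun x h => h)]
  dsimp only
  rw [List.nil_append]
  have hnd : ((PySem.Set.ofList ((items.map Prod.snd).flatten)).filter
      (fun y => !(PySem.Set.contains keys y))).Nodup :=
    (PySem.Set.nodup_ofList _).filter _
  rw [PySem.Set.ofList_eq_self_of_nodup _ hnd, hk]
  rfl

-- ===== VERDICT (by name: the statement is the Claim_ definition above) =====
theorem create_poset_grouping_spec : Claim_equal_create_poset_grouping := by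
  intro poset sink_first _
  show create_poset_grouping poset sink_first = create_poset_grouping_alt poset sink_first
  simp only [create_poset_grouping, create_poset_grouping_alt]
  set d := (PySem.Dict.ofList poset).items.filter (fun kv => kv.2.length > 0) with hd
  set keys := PySem.Set.ofList (d.map Prod.fst) with hkeys
  have hnd : (d.map Prod.fst).Nodup := by
    have h0 := PySem.Dict.nodup_keys_ofList (κ := Int) (ν := List Int) poset
    simp only [PySem.Dict.keys] at h0
    exact h0.sublist ((List.filter_sublist).map Prod.fst)
  have hsub : ∀ k ∈ d.map Prod.fst, PySem.Set.contains keys k = true := by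
    intro k hk
    simp [hkeys, PySem.Set.contains_iff, PySem.Set.mem_ofList, hk]
  have hcnt : ∀ x ∈ d.map Prod.fst,
      (pvCountInit d keys).1.getD x 0 = ((d.map Prod.snd).flatten.count x : Int) := by
    intro x hx
    rw [pvCountInit_cnt, if_pos (hsub x hx)]
  rw [pvPeel_lockstep d.length d keys (pvCountInit d keys).1 0 PySem.Dict.empty hnd hsub hcnt]
  rw [pvCountInit_extreme d keys hkeys]
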